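-- pv_equiv track=rewrite | github.com/runstr/AoC22 | y2023/Day12/day12_1.py | check_map2
-- ===== SOURCE A (Python) =====
-- def check_map2(map, requirements):
--     map = "."+map+"."
--     for key, value in requirements.items():
--         count = 0
--         for i in range(0, len(map) - len(key)+1):
--             check_value = map[i:i+len(key)]
--             if check_value == key:
--                 count += 1
--         if count != value:
--             return False
--     return True
-- ===== SOURCE B (Python) =====
-- def check_map2(map, requirements):
--     m = "." + map + "."
--     # build, once per distinct key length L, a hash index: counts of ALL windows of length L
--     window_counts = {}
--     for key in requirements:
--         L = len(key)
--         if L not in window_counts: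
--             c = {}
--             for i in range(len(m) - L + 1):
--                 w = m[i:i+L]
--                 c[w] = c.get(w, 0) + 1
--             window_counts[L] = c
--     # every key is then a single dictionary lookup
--     return all(window_counts[len(key)].get(key, 0) == value
--                for key, value in requirements.items())
-- ===== Notes on version B (the rewrite author's own statement) =====
-- stated objective: alternative
-- what changed: B builds, once per distinct key length, a dictionary counting every fixed-length window of the padded map, and then answers each requirement with a single hash lookup, instead of A's fresh scan-and-compare over the whole map for every key.
import Mathlib
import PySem

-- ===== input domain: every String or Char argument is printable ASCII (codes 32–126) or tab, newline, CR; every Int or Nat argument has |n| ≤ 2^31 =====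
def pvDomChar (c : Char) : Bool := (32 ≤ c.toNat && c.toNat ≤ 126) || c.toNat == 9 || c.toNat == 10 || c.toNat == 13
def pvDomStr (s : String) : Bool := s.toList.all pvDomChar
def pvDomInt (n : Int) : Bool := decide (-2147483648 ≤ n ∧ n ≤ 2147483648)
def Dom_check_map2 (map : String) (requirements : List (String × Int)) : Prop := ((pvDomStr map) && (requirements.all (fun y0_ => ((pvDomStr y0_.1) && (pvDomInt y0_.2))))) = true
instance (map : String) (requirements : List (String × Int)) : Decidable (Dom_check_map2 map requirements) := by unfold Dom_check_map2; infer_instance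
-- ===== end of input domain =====

-- B replaces A's per-key scan of the map by a hash index (a dict of window counts built once
-- per distinct key length), each key then being one dictionary lookup (objective: alternative;
-- return value only — neither program mutates its arguments).

-- ===== PORT A =====
-- inner loop of A: count = 0; for i in range(0, len(m)-len(key)+1): if m[i:i+len(key)] == key: count += 1
def aCount (m k : List Char) : Int :=
  (PySem.List.pyRange 0 ((m.length : Int) - (k.length : Int) + 1) 1).foldl
    (fun count i =>
      if PySem.List.slice m (some i) (some (i + (k.length : Int))) = k then count + 1
      else count) 0

-- outer loop of A: early return False when count != value
def aLoop (m : List Char) : List (String × Int) → Bool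
  | [] => true
  | (key, value) :: rest =>
      if aCount m key.toList ≠ value then false else aLoop m rest

def check_map2 (map : String) (requirements : List (String × Int)) : Bool :=
  aLoop ('.' :: map.toList ++ ['.']) (PySem.Dict.ofList requirements).items

-- ===== PORT B =====
-- all windows m[i:i+L] of one length L
def bWindows (m : List Char) (L : Nat) : List (List Char) :=
  (PySem.List.pyRange 0 ((m.length : Int) - (L : Int) + 1) 1).map
    (fun i => PySem.List.slice m (some i) (some (i + (L : Int))))

-- c = {}; for i in …: w = m[i:i+L]; c[w] = c.get(w, 0) + 1
def bCounter (m : List Char) (L : Nat) : PySem.Dict (List Char) Int :=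
  (bWindows m L).foldl (fun c w => c.insert w (c.getD w 0 + 1)) PySem.Dict.empty

-- for key in requirements: if len(key) not in window_counts: window_counts[len(key)] = c
def bBuild (m : List Char) (keys : List String) : PySem.Dict Nat (PySem.Dict (List Char) Int) :=
  keys.foldl
    (fun wc key =>
      if wc.contains key.toList.length then wc
      else wc.insert key.toList.length (bCounter m key.toList.length))
    PySem.Dict.empty

def check_map2_alt (map : String) (requirements : List (String × Int)) : Bool :=
  let m := '.' :: map.toList ++ ['.']
  let d := PySem.Dict.ofList requirements
  let wc := bBuild m d.keys
  -- window_counts[len(key)] never raises: the loop above stored a counter for every key's length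
  d.items.all (fun p =>
    ((wc.get? p.1.toList.length).getD PySem.Dict.empty).getD p.1.toList 0 == p.2)

-- ===== PRECONDITION & SPEC =====
def Spec_check_map2 (map : String) (requirements : List (String × Int)) (out : Bool) : Prop := out = check_map2_alt map requirements
instance (map : String) (requirements : List (String × Int)) (out : Bool) : Decidable (Spec_check_map2 map requirements out) := by unfold Spec_check_map2; infer_instance

-- ===== CLAIM (what is proved, stated in full; the proofs are below) =====
def Claim_equal_check_map2 : Prop := ∀ (map : String) (requirements : List (String × Int)), Dom_check_map2 map requirements → Spec_check_map2 map requirements (check_map2 map requirements)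

-- ===== LEMMAS AND PROOFS =====

-- A's per-key count is the multiplicity of the key among the windows of its length
theorem aCount_eq_count (m k : List Char) :
    aCount m k = ((bWindows m k.length).count k : Int) := by
  unfold aCount bWindows
  rw [PySem.List.foldl_ite_add_one]
  rw [List.count_eq_countP, List.countP_map, zero_add]
  congr 1
  apply List.countP_congr
  intro i _
  simp [Function.comp]

-- B's counter lookup is that multiplicity
theorem bCounter_getD (m : List Char) (L : Nat) (k : List Char) :
    (bCounter m L).getD k 0 = ((bWindows m L).count k : Int) := by
  unfold bCounter
  rw [PySem.Dict.getD_foldl_insert_add_one]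
  simp [PySem.Dict.getD_empty]

def bStep (m : List Char) (wc : PySem.Dict Nat (PySem.Dict (List Char) Int)) (key : String) :
    PySem.Dict Nat (PySem.Dict (List Char) Int) :=
  if wc.contains key.toList.length then wc
  else wc.insert key.toList.length (bCounter m key.toList.length)

theorem bBuild_eq_foldl (m : List Char) (keys : List String) :
    bBuild m keys = keys.foldl (bStep m) PySem.Dict.empty := rfl

-- every value ever stored in window_counts at key L is the counter for L
theorem bBuild_inv (m : List Char) (l : List String)
    (wc : PySem.Dict Nat (PySem.Dict (List Char) Int))
    (h : ∀ L c, wc.get? L = some c → c = bCounter m L) :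
    ∀ L c, (l.foldl (bStep m) wc).get? L = some c → c = bCounter m L := by
  induction l generalizing wc with
  | nil => exact h
  | cons key rest ih =>
      refine ih _ ?_
      intro L c hc
      unfold bStep at hc
      split at hc
      · exact h L c hc
      · rw [PySem.Dict.get?_insert] at hc
        split at hc
        · cases hc; simp [*]
        · exact h L c hc

-- the fold never erases a binding
theorem bBuild_mono (m : List Char) (l : List String)
    (wc : PySem.Dict Nat (PySem.Dict (List Char) Int)) (L : Nat)
    (h : (wc.get? L).isSome) : ((l.foldl (bStep m) wc).get? L).isSome := by
  induction l generalizing wc with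
  | nil => exact h
  | cons key rest ih =>
      refine ih _ ?_
      unfold bStep
      split
      · exact h
      · rw [PySem.Dict.get?_insert]
        split
        · simp
        · exact h

-- after the fold, every iterated key's length is bound
theorem bBuild_some (m : List Char) (l : List String)
    (wc : PySem.Dict Nat (PySem.Dict (List Char) Int)) :
    ∀ key ∈ l, ((l.foldl (bStep m) wc).get? key.toList.length).isSome := by
  induction l generalizing wc with
  | nil => intro key hk; cases hk
  | cons q rest ih =>
      intro key hk
      rcases List.mem_cons.mp hk with rfl | hk
      · refine bBuild_mono m rest _ _ ?_
        unfold bStep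
        split
        · next hcont => rw [PySem.Dict.contains_eq_isSome_get?] at hcont; exact hcont
        · rw [PySem.Dict.get?_insert_self]; simp
      · exact ih _ key hk

-- hence B's lookup for an iterated key IS the counter for its length
theorem bBuild_get? (m : List Char) (l : List String) (key : String) (hk : key ∈ l) :
    (bBuild m l).get? key.toList.length = some (bCounter m key.toList.length) := by
  have hs := bBuild_some m l PySem.Dict.empty key hk
  rw [← bBuild_eq_foldl] at hs
  obtain ⟨c, hc⟩ := Option.isSome_iff_exists.mp hs
  have := bBuild_inv m l PySem.Dict.empty (by
    intro L c h; rw [PySem.Dict.get?_empty] at h; cases h) key.toList.length c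
  rw [← bBuild_eq_foldl] at this
  rw [hc, this hc]

-- A's early-return loop is List.all of the per-key test
theorem aLoop_eq_all (m : List Char) (l : List (String × Int)) :
    aLoop m l = l.all (fun p => aCount m p.1.toList == p.2) := by
  induction l with
  | nil => rfl
  | cons p rest ih =>
      obtain ⟨key, value⟩ := p
      by_cases h : aCount m key.toList = value
      · simp [aLoop, h, ih]
      · simp [aLoop, h]

theorem all_congr_mem {α : Type} (l : List α) (p q : α → Bool)
    (h : ∀ x ∈ l, p x = q x) : l.all p = l.all q := by
  induction l with
  | nil => rfl
  | cons x xs ih =>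
      simp only [List.all_cons, h x (by simp), ih (fun y hy => h y (by simp [hy]))]

-- ===== VERDICT (by name: the statement is the Claim_ definition above) =====
theorem check_map2_spec : Claim_equal_check_map2 := by
  intro map requirements _
  unfold Spec_check_map2 check_map2 check_map2_alt
  rw [aLoop_eq_all]
  refine (all_congr_mem _ _ _ ?_)
  intro p hp
  have hkey : p.1 ∈ (PySem.Dict.ofList requirements).keys :=
    PySem.Dict.mem_keys_of_mem_items _ hp
  rw [bBuild_get? ('.' :: map.toList ++ ['.']) _ p.1 hkey]
  simp only [Option.getD_some, bCounter_getD, aCount_eq_count]
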